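-- pv_equiv track=rewrite | github.com/LeKotLaCat/IPA_LAB_3 | pscp-2.py | simulate_run_for_y
-- ===== SOURCE A (Python) =====
-- def simulate_run_for_y(treasures, k):
--     """จำลองการเล่นเกมเพื่อหาผลรวมสุดท้าย (สำหรับใช้สร้างค่า y)"""
--     n = len(treasures)
--     current_treasure = 0
--     for i in range(k - 1, n):
--         value = treasures[i]
--         if value == 0:
--             current_treasure = 0
--         else:
--             current_treasure += value
--     return current_treasure
-- ===== SOURCE B (Python) =====
-- def simulate_run_for_y(treasures, k):
--     n = len(treasures)
--     total = 0
--     for i in reversed(range(k - 1, n)):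
--         value = treasures[i]
--         if value == 0:
--             break
--         total += value
--     return total
-- ===== Notes on version B (the rewrite author's own statement) =====
-- stated objective: alternative
-- what changed: B scans the same index range backwards, summing values and breaking at the first zero, instead of A's forward accumulate-with-reset-on-zero pass.
import Mathlib
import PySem

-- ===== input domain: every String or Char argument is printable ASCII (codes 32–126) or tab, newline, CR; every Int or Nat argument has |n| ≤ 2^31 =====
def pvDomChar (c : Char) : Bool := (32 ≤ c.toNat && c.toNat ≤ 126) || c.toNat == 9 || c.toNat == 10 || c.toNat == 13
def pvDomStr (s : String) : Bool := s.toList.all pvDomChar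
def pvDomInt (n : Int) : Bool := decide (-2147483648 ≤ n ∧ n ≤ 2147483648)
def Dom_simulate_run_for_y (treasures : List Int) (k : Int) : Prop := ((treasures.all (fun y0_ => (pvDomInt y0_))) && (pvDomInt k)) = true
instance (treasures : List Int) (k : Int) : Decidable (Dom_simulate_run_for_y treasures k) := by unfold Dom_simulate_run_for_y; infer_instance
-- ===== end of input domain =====

-- B replaces A's forward accumulate-with-reset-on-zero loop by a backward scan over the
-- same index range that sums values and stops at the first zero (alternative algorithm).


-- ===== PORT A =====
-- for i in range(k-1, n): value = treasures[i]; reset on zero else accumulate.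
-- The Option state models the IndexError of treasures[i] (none = raised; excluded by Pre_).
def simulate_run_for_y (treasures : List Int) (k : Int) : Int :=
  ((PySem.List.pyRange (k - 1) (treasures.length : Int) 1).foldl
      (fun acc i =>
        match acc with
        | none => none
        | some cur =>
          match PySem.List.pyGet? treasures i with
          | none => none
          | some value => some (if value = 0 then 0 else cur + value))
      (some 0)).getD 0

-- ===== PORT B =====
-- backward scan with break at the first zero; a none from treasures[i] is a Python
-- IndexError, outside Pre_ (the port just returns the total there).
def pvBLoop (treasures : List Int) : List Int → Int → Int
  | [], total => total
  | i :: rest, total =>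
    match PySem.List.pyGet? treasures i with
    | none => total
    | some value => if value = 0 then total else pvBLoop treasures rest (total + value)

def simulate_run_for_y_alt (treasures : List Int) (k : Int) : Int :=
  pvBLoop treasures ((PySem.List.pyRange (k - 1) (treasures.length : Int) 1).reverse) 0

-- ===== PRECONDITION & SPEC =====
-- Pre_ excludes exactly the inputs where A raises IndexError: a nonempty range whose
-- first index k-1 is below -len(treasures).
def Pre_simulate_run_for_y (treasures : List Int) (k : Int) : Prop :=
  (treasures.length : Int) ≤ k - 1 ∨ -(treasures.length : Int) ≤ k - 1
instance (treasures : List Int) (k : Int) : Decidable (Pre_simulate_run_for_y treasures k) := by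
  unfold Pre_simulate_run_for_y; infer_instance

def pvWitness_simulate_run_for_y : List Int × Int := ([1, 0, 2, 3], 2)

def Spec_simulate_run_for_y (treasures : List Int) (k : Int) (out : Int) : Prop := out = simulate_run_for_y_alt treasures k
instance (treasures : List Int) (k : Int) (out : Int) : Decidable (Spec_simulate_run_for_y treasures k out) := by unfold Spec_simulate_run_for_y; infer_instance

-- ===== CLAIM (what is proved, stated in full; the proofs are below) =====
def Claim_equal_simulate_run_for_y : Prop := ∀ (treasures : List Int) (k : Int), Dom_simulate_run_for_y treasures k → Pre_simulate_run_for_y treasures k → Spec_simulate_run_for_y treasures k (simulate_run_for_y treasures k)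

-- ===== LEMMAS AND PROOFS =====

-- A's loop body on the extracted values
def pvFwd (vs : List Int) (c : Int) : Int :=
  vs.foldl (fun cur v => if v = 0 then 0 else cur + v) c

-- B's loop body on the extracted values
def pvBwd : List Int → Int → Int
  | [], a => a
  | v :: r, a => if v = 0 then a else pvBwd r (a + v)

theorem pvBwd_reverse (vs : List Int) (acc : Int) :
    pvBwd vs.reverse acc = pvFwd vs 0 + acc := by
  induction vs using List.reverseRecOn generalizing acc with
  | nil => simp [pvBwd, pvFwd]
  | append_singleton l v ih =>
    simp only [List.reverse_append, List.reverse_singleton, List.singleton_append,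
      pvBwd, pvFwd, List.foldl_append, List.foldl_cons, List.foldl_nil]
    by_cases hv : v = 0
    · simp [hv, pvFwd]
    · simp only [hv, ih, if_false]
      have e : List.foldl (fun cur v => if v = 0 then 0 else cur + v) 0 l = pvFwd l 0 := rfl
      rw [e]; ring

theorem pvAFold_bridge (treasures : List Int) (is : List Int)
    (h : ∀ i ∈ is, PySem.List.pyGet? treasures i ≠ none) (cur : Int) :
    is.foldl
      (fun acc i =>
        match acc with
        | none => none
        | some cur =>
          match PySem.List.pyGet? treasures i with
          | none => none
          | some value => some (if value = 0 then 0 else cur + value))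
      (some cur)
    = some (pvFwd (is.map (fun i => (PySem.List.pyGet? treasures i).getD 0)) cur) := by
  induction is generalizing cur with
  | nil => simp [pvFwd]
  | cons i rest ih =>
    have hi := h i (by simp)
    obtain ⟨v, hv⟩ := Option.ne_none_iff_exists'.mp hi
    have hrest : ∀ j ∈ rest, PySem.List.pyGet? treasures j ≠ none :=
      fun j hj => h j (by simp [hj])
    simp [hv, ih hrest, pvFwd]

theorem pvBLoop_bridge (treasures : List Int) (is : List Int)
    (h : ∀ i ∈ is, PySem.List.pyGet? treasures i ≠ none) (acc : Int) :
    pvBLoop treasures is acc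
    = pvBwd (is.map (fun i => (PySem.List.pyGet? treasures i).getD 0)) acc := by
  induction is generalizing acc with
  | nil => rfl
  | cons i rest ih =>
    have hi := h i (by simp)
    obtain ⟨v, hv⟩ := Option.ne_none_iff_exists'.mp hi
    have hrest : ∀ j ∈ rest, PySem.List.pyGet? treasures j ≠ none :=
      fun j hj => h j (by simp [hj])
    simp [pvBLoop, pvBwd, hv, ih hrest]

-- ===== VERDICT (by name: the statement is the Claim_ definition above) =====
theorem simulate_run_for_y_spec : Claim_equal_simulate_run_for_y := by
  intro treasures k _ hpre
  unfold Spec_simulate_run_for_y simulate_run_for_y simulate_run_for_y_alt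
  have hvalid : ∀ i ∈ PySem.List.pyRange (k - 1) (treasures.length : Int) 1,
      PySem.List.pyGet? treasures i ≠ none := by
    intro i hi
    rw [PySem.List.mem_pyRange_one] at hi
    rw [Ne, PySem.List.pyGet?_eq_none_iff]
    unfold PySem.Raise.InRange
    rcases hpre with h | h
    · omega
    · omega
  have hvalid' : ∀ i ∈ (PySem.List.pyRange (k - 1) (treasures.length : Int) 1).reverse,
      PySem.List.pyGet? treasures i ≠ none := by
    intro i hi; exact hvalid i (List.mem_reverse.mp hi)
  rw [pvAFold_bridge treasures _ hvalid 0, pvBLoop_bridge treasures _ hvalid' 0,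
    List.map_reverse, pvBwd_reverse]
  simp
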